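-- pv_equiv track=rewrite | github.com/martingiguere/hakko-203-firmware-video | extract_pipeline.py | detect_and_split_groups
-- ===== SOURCE A (Python) =====
-- def detect_and_split_groups(addr_results):
--     """Detect split-scroll frames and partition rows into consistent groups.
--
--     During Xeltek UI scrolling, frames can show two disconnected address
--     ranges (top = new position, bottom = old position). Detect by finding
--     gaps > 0x30 or address reversals between consecutive rows (sorted by
--     row_y). Each group is then validated independently.
--
--     Args:
--         addr_results: list of (addr_int, row_y, confidence) from raw OCR
--
--     Returns:
--         List of groups, each a list of (addr_int, row_y, confidence).
--     """
--     if len(addr_results) <= 2: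
--         return [addr_results]
--
--     sorted_rows = sorted(addr_results, key=lambda x: x[1])  # sort by row_y
--
--     groups = [[sorted_rows[0]]]
--     for i in range(1, len(sorted_rows)):
--         prev_addr = sorted_rows[i - 1][0]
--         curr_addr = sorted_rows[i][0]
--         delta = curr_addr - prev_addr
--
--         # Expected delta for one row: +0x10 (scrolling down)
--         # Raw OCR addresses are noisy (~35% accuracy), so threshold must be
--         # high enough to ignore OCR errors but catch genuine split-scroll
--         # artifacts (which have deltas of 0x200+ between address regions).
--         # Use 0x100 (16 rows of address space) as the split threshold.
--         if delta < -0x100 or delta > 0x100: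
--             groups.append([])
--         groups[-1].append(sorted_rows[i])
--
--     return groups
-- ===== SOURCE B (Python) =====
-- def detect_and_split_groups(addr_results):
--     n = len(addr_results)
--     if n <= 2:
--         return [addr_results]
--     rows = sorted(addr_results, key=lambda x: x[1])
--     cuts = [i for i in range(1, n) if abs(rows[i][0] - rows[i - 1][0]) > 0x100]
--     bounds = [0] + cuts + [n]
--     return [rows[a:b] for a, b in zip(bounds, bounds[1:])]
-- ===== Notes on version B (the rewrite author's own statement) =====
-- stated objective: alternative
-- what changed: Replaces A's fused index loop that mutates the last group of a growing group list with two separate passes: a comprehension collecting split indices, then slicing the sorted list at those boundaries.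
import Mathlib
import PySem

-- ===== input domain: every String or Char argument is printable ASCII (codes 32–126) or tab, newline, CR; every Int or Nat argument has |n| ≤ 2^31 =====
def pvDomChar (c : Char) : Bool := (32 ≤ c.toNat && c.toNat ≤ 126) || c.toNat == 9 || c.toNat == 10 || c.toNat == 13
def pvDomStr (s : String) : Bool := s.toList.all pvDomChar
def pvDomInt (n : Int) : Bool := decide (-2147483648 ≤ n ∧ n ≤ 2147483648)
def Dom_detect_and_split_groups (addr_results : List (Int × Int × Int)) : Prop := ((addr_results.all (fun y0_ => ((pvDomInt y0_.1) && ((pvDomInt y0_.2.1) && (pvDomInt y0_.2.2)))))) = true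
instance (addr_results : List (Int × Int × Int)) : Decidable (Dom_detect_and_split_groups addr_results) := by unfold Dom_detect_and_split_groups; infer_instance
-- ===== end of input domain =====

-- B replaces A's fused index loop (which grows a list of groups and appends to its last
-- group in place) by two separate passes: collect the split indices, then slice the sorted
-- list at those boundaries; same return value, stated objective: alternative decomposition.

-- ===== PORT A =====
def detect_and_split_groups (addr_results : List (Int × Int × Int)) : List (List (Int × Int × Int)) :=
  if addr_results.length ≤ 2 then [addr_results]
  else
    let sorted_rows := PySem.List.sorted addr_results (fun x => x.2.1)
    (PySem.List.pyRange 1 (sorted_rows.length : Int) 1).foldl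
      (fun groups i =>
        let prev_addr := (PySem.List.pyGetD sorted_rows (i - 1) (0, 0, 0)).1
        let curr_addr := (PySem.List.pyGetD sorted_rows i (0, 0, 0)).1
        let delta := curr_addr - prev_addr
        let groups := if delta < -0x100 ∨ delta > 0x100 then groups ++ [[]] else groups
        -- groups[-1].append(sorted_rows[i])
        groups.dropLast ++ [groups.getLast?.getD [] ++ [PySem.List.pyGetD sorted_rows i (0, 0, 0)]])
      [[PySem.List.pyGetD sorted_rows 0 (0, 0, 0)]]

-- ===== PORT B =====
def detect_and_split_groups_alt (addr_results : List (Int × Int × Int)) : List (List (Int × Int × Int)) :=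
  let n := addr_results.length
  if n ≤ 2 then [addr_results]
  else
    let rows := PySem.List.sorted addr_results (fun x => x.2.1)
    let cuts := (PySem.List.pyRange 1 (n : Int) 1).filter
      (fun i => decide ((0x100 : Int) < |(PySem.List.pyGetD rows i (0, 0, 0)).1 - (PySem.List.pyGetD rows (i - 1) (0, 0, 0)).1|))
    let bounds := [(0 : Int)] ++ cuts ++ [(n : Int)]
    (bounds.zip bounds.tail).map (fun ab => PySem.List.slice rows (some ab.1) (some ab.2))

-- ===== PRECONDITION & SPEC =====
def Spec_detect_and_split_groups (addr_results : List (Int × Int × Int)) (out : List (List (Int × Int × Int))) : Prop := out = detect_and_split_groups_alt addr_results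
instance (addr_results : List (Int × Int × Int)) (out : List (List (Int × Int × Int))) : Decidable (Spec_detect_and_split_groups addr_results out) := by unfold Spec_detect_and_split_groups; infer_instance

-- ===== CLAIM (what is proved, stated in full; the proofs are below) =====
def Claim_equal_detect_and_split_groups : Prop := ∀ (addr_results : List (Int × Int × Int)), Dom_detect_and_split_groups addr_results → Spec_detect_and_split_groups addr_results (detect_and_split_groups addr_results)

-- ===== LEMMAS AND PROOFS =====

-- common gap test on an adjacent pair of rows
def pvGap (p c : Int × Int × Int) : Bool := decide ((0x100 : Int) < |c.1 - p.1|)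

-- the grouping both programs compute, as a recursion on the list of adjacent pairs
def pvGrp (g : List (Int × Int × Int)) : List ((Int × Int × Int) × (Int × Int × Int)) → List (List (Int × Int × Int))
  | [] => [g]
  | (p, c) :: ps => if pvGap p c then g :: pvGrp [c] ps else pvGrp (g ++ [c]) ps

theorem gap_iff (p c : Int × Int × Int) :
    (c.1 - p.1 < -0x100 ∨ c.1 - p.1 > 0x100) ↔ pvGap p c = true := by
  simp [pvGap, lt_abs]
  omega

theorem loopA (rows : List (Int × Int × Int)) :
    ∀ (m j : Nat) (gs : List (List (Int × Int × Int))) (g : List (Int × Int × Int)),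
      j < rows.length → rows.length - (j + 1) = m →
      (PySem.List.pyRange ((j : Int) + 1) (rows.length : Int) 1).foldl
        (fun groups i =>
          let prev_addr := (PySem.List.pyGetD rows (i - 1) (0, 0, 0)).1
          let curr_addr := (PySem.List.pyGetD rows i (0, 0, 0)).1
          let delta := curr_addr - prev_addr
          let groups := if delta < -0x100 ∨ delta > 0x100 then groups ++ [[]] else groups
          groups.dropLast ++ [groups.getLast?.getD [] ++ [PySem.List.pyGetD rows i (0, 0, 0)]])
        (gs ++ [g])
      = gs ++ pvGrp g ((rows.zip rows.tail).drop j) := by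
  intro m
  induction m with
  | zero =>
    intro j gs g hj hm
    have hjn : j + 1 = rows.length := by omega
    rw [PySem.List.pyRange_one_eq_nil (by omega)]
    have hdrop : (rows.zip rows.tail).drop j = [] := by
      apply List.drop_eq_nil_of_le
      simp [List.length_zip]; omega
    simp [hdrop, pvGrp]
  | succ m ih =>
    intro j gs g hj hm
    have hj1 : j + 1 < rows.length := by omega
    rw [PySem.List.pyRange_one_cons (by omega)]
    rw [List.foldl_cons]
    have hcast : ((j : Int) + 1) - 1 = ((j : Nat) : Int) := by omega
    have hget1 : PySem.List.pyGetD rows ((j : Int) + 1 - 1) (0, 0, 0) = rows[j] := by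
      rw [hcast, PySem.List.pyGetD_natCast, List.getD_eq_getElem?_getD, List.getElem?_eq_getElem hj]
      rfl
    have hcast2 : ((j : Int) + 1) = (((j + 1 : Nat) : Int)) := by push_cast; ring
    have hget2 : PySem.List.pyGetD rows ((j : Int) + 1) (0, 0, 0) = rows[j + 1] := by
      rw [hcast2, PySem.List.pyGetD_natCast, List.getD_eq_getElem?_getD, List.getElem?_eq_getElem hj1]
      rfl
    have hzlen : j < (rows.zip rows.tail).length := by
      simp [List.length_zip]; omega
    have hdrop : (rows.zip rows.tail).drop j
        = (rows[j], rows[j + 1]) :: (rows.zip rows.tail).drop (j + 1) := by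
      rw [List.drop_eq_getElem_cons hzlen]
      congr 1
      rw [List.getElem_zip]
      congr 1
      rw [List.getElem_tail]
    simp only [hget1, hget2]
    rw [hdrop]
    by_cases hcond : rows[j + 1].1 - rows[j].1 < -0x100 ∨ rows[j + 1].1 - rows[j].1 > 0x100
    · have hgap : pvGap rows[j] rows[j + 1] = true := (gap_iff _ _).mp hcond
      simp only [hcond, if_true, pvGrp, hgap]
      have hstate : ((gs ++ [g]) ++ [[]]).dropLast ++
          [(((gs ++ [g]) ++ [[]]).getLast?.getD []) ++ [rows[j + 1]]]
          = (gs ++ [g]) ++ [[rows[j + 1]]] := by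
        simp
      rw [hstate]
      have := ih (j + 1) (gs ++ [g]) [rows[j + 1]] hj1 (by omega)
      rw [show ((j : Int) + 1 + 1) = (((j + 1 : Nat) : Int) + 1) by push_cast; ring]
      rw [this]
      simp
    · have hgap : pvGap rows[j] rows[j + 1] = false := by
        have h : ¬ pvGap rows[j] rows[j + 1] = true := fun h => hcond ((gap_iff _ _).mpr h)
        simpa using h
      simp only [hcond, if_false, pvGrp, hgap]
      have hstate : (gs ++ [g]).dropLast ++ [((gs ++ [g]).getLast?.getD []) ++ [rows[j + 1]]]
          = gs ++ [g ++ [rows[j + 1]]] := by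
        simp
      rw [hstate]
      have := ih (j + 1) gs (g ++ [rows[j + 1]]) hj1 (by omega)
      rw [show ((j : Int) + 1 + 1) = (((j + 1 : Nat) : Int) + 1) by push_cast; ring]
      rw [this]
      simp

-- proof-only abbreviations for B's two passes
def pvCuts (rows : List (Int × Int × Int)) (a : Int) : List Int :=
  (PySem.List.pyRange a (rows.length : Int) 1).filter
    (fun i => decide ((0x100 : Int) < |(PySem.List.pyGetD rows i (0, 0, 0)).1 - (PySem.List.pyGetD rows (i - 1) (0, 0, 0)).1|))

def pvSliceMap (rows : List (Int × Int × Int)) (bounds : List Int) : List (List (Int × Int × Int)) :=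
  (bounds.zip bounds.tail).map (fun ab => PySem.List.slice rows (some ab.1) (some ab.2))

theorem pvSliceMap_cons (rows : List (Int × Int × Int)) (x y : Int) (t : List Int) :
    pvSliceMap rows (x :: y :: t) = PySem.List.slice rows (some x) (some y) :: pvSliceMap rows (y :: t) := by
  simp [pvSliceMap]

theorem loopB (rows : List (Int × Int × Int)) :
    ∀ (m j b : Nat), b ≤ j → j < rows.length → rows.length - (j + 1) = m →
      pvSliceMap rows ((b : Int) :: (pvCuts rows ((j : Int) + 1) ++ [(rows.length : Int)]))
      = pvGrp ((rows.drop b).take (j + 1 - b)) ((rows.zip rows.tail).drop j) := by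
  intro m
  induction m with
  | zero =>
    intro j b hb hj hm
    have hjn : j + 1 = rows.length := by omega
    rw [pvCuts, PySem.List.pyRange_one_eq_nil (by omega)]
    have hdrop : (rows.zip rows.tail).drop j = [] := by
      apply List.drop_eq_nil_of_le
      simp [List.length_zip]; omega
    rw [hdrop]
    simp only [List.filter_nil, List.nil_append, pvSliceMap_cons, pvGrp]
    rw [PySem.List.slice_natCast]
    simp [pvSliceMap, hjn]
  | succ m ih =>
    intro j b hb hj hm
    have hj1 : j + 1 < rows.length := by omega
    have hget1 : PySem.List.pyGetD rows (((j : Int) + 1) - 1) (0, 0, 0) = rows[j] := by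
      rw [show ((j : Int) + 1) - 1 = ((j : Nat) : Int) by omega,
        PySem.List.pyGetD_natCast, List.getD_eq_getElem?_getD, List.getElem?_eq_getElem hj]
      rfl
    have hget2 : PySem.List.pyGetD rows ((j : Int) + 1) (0, 0, 0) = rows[j + 1] := by
      rw [show ((j : Int) + 1) = (((j + 1 : Nat) : Int)) by push_cast; ring,
        PySem.List.pyGetD_natCast, List.getD_eq_getElem?_getD, List.getElem?_eq_getElem hj1]
      rfl
    have hzlen : j < (rows.zip rows.tail).length := by
      simp [List.length_zip]; omega
    have hdrop : (rows.zip rows.tail).drop j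
        = (rows[j], rows[j + 1]) :: (rows.zip rows.tail).drop (j + 1) := by
      rw [List.drop_eq_getElem_cons hzlen]
      congr 1
      rw [List.getElem_zip]
      congr 1
      rw [List.getElem_tail]
    have hcuts : pvCuts rows ((j : Int) + 1)
        = (if pvGap rows[j] rows[j + 1] then [((j : Int) + 1)] else []) ++ pvCuts rows (((j + 1 : Nat) : Int) + 1) := by
      rw [pvCuts, PySem.List.pyRange_one_cons (by omega), List.filter_cons]
      simp only [hget1, hget2]
      rw [show ((j : Int) + 1 + 1) = (((j + 1 : Nat) : Int) + 1) by push_cast; ring]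
      cases h : pvGap rows[j] rows[j + 1]
      · simp only [pvGap] at h
        simp [h, pvCuts]
      · simp only [pvGap] at h
        simp [h, pvCuts]
    rw [hdrop, hcuts]
    have hsingle1 : List.take 1 (List.drop (j + 1) rows) = [rows[j + 1]] := by
      rw [List.drop_eq_getElem_cons hj1]
      rfl
    by_cases h : pvGap rows[j] rows[j + 1]
    · simp only [h, if_true, pvGrp, List.cons_append]
      rw [show ((j : Int) + 1) = (((j + 1 : Nat) : Int)) by push_cast; ring]
      rw [pvSliceMap_cons]
      congr 1
      · rw [PySem.List.slice_natCast]
      · rw [List.nil_append, ih (j + 1) (j + 1) (le_refl _) hj1 (by omega)]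
        rw [show j + 1 + 1 - (j + 1) = 1 by omega, hsingle1]
    · simp only [h, Bool.false_eq_true, if_false, List.nil_append, pvGrp]
      rw [ih (j + 1) b (by omega) hj1 (by omega)]
      congr 1
      rw [show j + 1 + 1 - b = (j + 1 - b) + 1 by omega, List.take_add_one]
      congr 1
      rw [List.getElem?_drop, show b + (j + 1 - b) = j + 1 by omega, List.getElem?_eq_getElem hj1]
      rfl

-- ===== VERDICT (by name: the statement is the Claim_ definition above) =====
theorem take_one_eq (rows : List (Int × Int × Int)) (h : 0 < rows.length) :
    List.take 1 rows = [rows[0]] := by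
  cases rows with
  | nil => simp at h
  | cons a t => rfl

theorem detect_and_split_groups_spec : Claim_equal_detect_and_split_groups := by
  intro xs _
  unfold Spec_detect_and_split_groups detect_and_split_groups detect_and_split_groups_alt
  by_cases hle : xs.length ≤ 2
  · simp [hle]
  · simp only [hle, if_false]
    have hlen : (PySem.List.sorted xs (fun x => x.2.1)).length = xs.length := by
      simp [pysem]
    set rows := PySem.List.sorted xs (fun x => x.2.1) with hrows
    have h0 : 0 < rows.length := by omega
    have hget0 : PySem.List.pyGetD rows 0 (0, 0, 0) = rows[0] := by
      rw [PySem.List.pyGetD_zero, List.getD_eq_getElem?_getD, List.getElem?_eq_getElem h0]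
      rfl
    have hA := loopA rows (rows.length - 1) 0 [] [rows[0]] (by omega) (by omega)
    have hB := loopB rows (rows.length - 1) 0 0 (le_refl 0) (by omega) (by omega)
    simp only [Nat.cast_zero, zero_add, List.nil_append, List.drop_zero, Nat.sub_zero] at hA hB
    rw [hget0, hA, ← hlen]
    rw [take_one_eq rows h0] at hB
    exact hB.symm
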